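-- pv_equiv track=rewrite | github.com/sssseungu/coding-test | baekjun/250919_15565_귀여운라이언.py | shortest_ryan_set
-- ===== SOURCE A (Python) =====
-- def shortest_ryan_set(doll_seq, n, k):
--
--     l_end, r_end = 0, 0
--     ryan_cnt = 1 if doll_seq[l_end] == "1" else 0
--     minimum_len = float("inf")
--
--     while r_end < n:
--
--         if l_end > r_end:
--             break
--
--         if ryan_cnt < k:
--             if r_end == n - 1:
--                 break
--             r_end += 1
--             ryan_cnt += 1 if doll_seq[r_end] == "1" else 0
--
--         else:
--             len_subseq = r_end - l_end + 1
--             minimum_len = min(minimum_len, len_subseq)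
--             ryan_cnt -= 1 if doll_seq[l_end] == "1" else 0
--             l_end += 1
--
--     return -1 if minimum_len == float("inf") else minimum_len
-- ===== SOURCE B (Python) =====
-- def shortest_ryan_set(doll_seq, n, k):
--     if k <= 0:
--         # every single doll already contains at least k (<= 0) lions;
--         # a (nonempty) window exists iff n >= 1
--         return 1 if n >= 1 else -1
--     positions = [i for i in range(n) if doll_seq[i] == "1"]
--     if len(positions) < k:
--         return -1
--     return min(positions[i + k - 1] - positions[i] + 1
--                for i in range(len(positions) - k + 1))
-- ===== Notes on version B (the rewrite author's own statement) =====
-- stated objective: simpler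
-- what changed: B replaces A's two-pointer sliding-window loop by building the list of lion positions once and taking the minimum of positions[i+k-1]-positions[i]+1 over consecutive groups of k positions (with a direct answer for k <= 0, where any single doll suffices).
-- outside the precondition, e.g. on shortest_ryan_set(['1'], 3, 1): A returns 1, B raises IndexError
import Mathlib
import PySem

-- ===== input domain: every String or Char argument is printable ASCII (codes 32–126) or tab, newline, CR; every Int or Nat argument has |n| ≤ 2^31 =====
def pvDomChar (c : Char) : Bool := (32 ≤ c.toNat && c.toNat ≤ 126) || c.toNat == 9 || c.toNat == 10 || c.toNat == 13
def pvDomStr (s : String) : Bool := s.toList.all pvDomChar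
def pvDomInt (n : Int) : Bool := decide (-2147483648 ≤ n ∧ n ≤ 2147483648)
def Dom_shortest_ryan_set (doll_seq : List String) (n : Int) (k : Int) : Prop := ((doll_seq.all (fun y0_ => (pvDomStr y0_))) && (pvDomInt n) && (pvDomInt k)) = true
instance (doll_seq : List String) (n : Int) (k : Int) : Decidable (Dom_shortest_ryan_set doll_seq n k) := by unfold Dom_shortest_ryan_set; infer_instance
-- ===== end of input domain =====

-- B replaces A's two-pointer window scan by an index table of lion positions and one
-- pass over consecutive groups of k positions (objective: simpler).

-- ===== PORT A =====
-- the while-loop of A: state (l_end, r_end, ryan_cnt, minimum_len); `none` models float("inf").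
-- doll_seq[i] is ported as pyGetD …  "": exact wherever the index is in range, which
-- Pre_shortest_ryan_set guarantees for every index the loop reads.
def shortest_ryan_set.loopA (doll_seq : List String) (n k : Int) (l r cnt : Int) (mn : Option Int) : Option Int :=
  if _hr : r < n then
    if _hl : l > r then mn
    else if _hc : cnt < k then
      if _he : r = n - 1 then mn
      else shortest_ryan_set.loopA doll_seq n k l (r + 1)
        (cnt + (if PySem.List.pyGetD doll_seq (r + 1) "" == "1" then 1 else 0)) mn
    else
      let len_subseq := r - l + 1
      let mn' : Option Int := some (match mn with | none => len_subseq | some m => min m len_subseq)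
      shortest_ryan_set.loopA doll_seq n k (l + 1) r
        (cnt - (if PySem.List.pyGetD doll_seq l "" == "1" then 1 else 0)) mn'
  else mn
termination_by (2 * n - l - r).toNat
decreasing_by all_goals omega

def shortest_ryan_set (doll_seq : List String) (n : Int) (k : Int) : Int :=
  -- ryan_cnt starts as (1 if doll_seq[0] == "1" else 0); minimum_len starts as none (= inf)
  match shortest_ryan_set.loopA doll_seq n k 0 0
      (if PySem.List.pyGetD doll_seq 0 "" == "1" then 1 else 0) none with
  | none => -1        -- minimum_len == float("inf")
  | some m => m

-- ===== PORT B =====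
-- positions = [i for i in range(n) if doll_seq[i] == "1"]
def shortest_ryan_set_alt.posList (doll_seq : List String) (n : Int) : List Int :=
  (PySem.List.pyRange 0 n 1).filter (fun i => PySem.List.pyGetD doll_seq i "" == "1")

def shortest_ryan_set_alt (doll_seq : List String) (n : Int) (k : Int) : Int :=
  if k ≤ 0 then (if 1 ≤ n then 1 else -1)
  else
    let positions := shortest_ryan_set_alt.posList doll_seq n
    if (positions.length : Int) < k then -1
    else
      -- min(positions[i+k-1] - positions[i] + 1 for i in range(len(positions)-k+1));
      -- the range is nonempty here, so Python's min never sees an empty iterable and .getD 0 is never used.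
      ((PySem.List.min?
        ((PySem.List.pyRange 0 ((positions.length : Int) - k + 1) 1).map
          (fun i => PySem.List.pyGetD positions (i + k - 1) 0 - PySem.List.pyGetD positions i 0 + 1))
        (fun x => x)).getD 0)

-- ===== PRECONDITION & SPEC =====
-- Pre_ excludes exactly the inputs on which A's unguarded indexing doll_seq[0] / doll_seq[r_end]
-- can raise IndexError: the empty list, and (for k ≥ 1, where the scan advances r_end) n beyond
-- len(doll_seq); on a few of the latter A stops before the bad index and returns — excluded, see cites.
def Pre_shortest_ryan_set (doll_seq : List String) (n : Int) (k : Int) : Prop :=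
  doll_seq ≠ [] ∧ (n ≤ (doll_seq.length : Int) ∨ k ≤ 0)
instance (doll_seq : List String) (n : Int) (k : Int) : Decidable (Pre_shortest_ryan_set doll_seq n k) := by
  unfold Pre_shortest_ryan_set; infer_instance

def pvWitness_shortest_ryan_set : List String × Int × Int := (["1", "0", "1"], 3, 2)

def Spec_shortest_ryan_set (doll_seq : List String) (n : Int) (k : Int) (out : Int) : Prop :=
  out = shortest_ryan_set_alt doll_seq n k
instance (doll_seq : List String) (n : Int) (k : Int) (out : Int) : Decidable (Spec_shortest_ryan_set doll_seq n k out) := by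
  unfold Spec_shortest_ryan_set; infer_instance

-- ===== CLAIM (what is proved, stated in full; the proofs are below) =====
def Claim_equal_shortest_ryan_set : Prop := ∀ (doll_seq : List String) (n : Int) (k : Int), Dom_shortest_ryan_set doll_seq n k → Pre_shortest_ryan_set doll_seq n k → Spec_shortest_ryan_set doll_seq n k (shortest_ryan_set doll_seq n k)

-- ===== LEMMAS AND PROOFS =====

-- number of lions at indices in [a, b)
def onesC (doll_seq : List String) (a b : Int) : Int :=
  (((PySem.List.pyRange a b 1).filter (fun i => PySem.List.pyGetD doll_seq i "" == "1")).length : Int)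

-- a window [a, b] (inclusive) inside [0, n) holding at least k lions
def Win (doll_seq : List String) (n k a b : Int) : Prop :=
  0 ≤ a ∧ a ≤ b ∧ b < n ∧ k ≤ onesC doll_seq a (b + 1)

-- "o is the minimum window length (none = no window)"
def Res (doll_seq : List String) (n k : Int) (o : Option Int) : Prop :=
  (∀ a b, Win doll_seq n k a b → ∃ m, o = some m ∧ m ≤ b - a + 1) ∧
  (∀ m, o = some m → ∃ a b, Win doll_seq n k a b ∧ m = b - a + 1)

theorem Res_unique (doll_seq : List String) (n k : Int) (o1 o2 : Option Int)
    (h1 : Res doll_seq n k o1) (h2 : Res doll_seq n k o2) : o1 = o2 := by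
  obtain ⟨c1, w1⟩ := h1
  obtain ⟨c2, w2⟩ := h2
  match ho1 : o1, ho2 : o2 with
  | none, none => rfl
  | none, some m2 =>
    obtain ⟨a, b, hw, _⟩ := w2 m2 rfl
    obtain ⟨m, hm, _⟩ := c1 a b hw
    simp at hm
  | some m1, none =>
    obtain ⟨a, b, hw, _⟩ := w1 m1 rfl
    obtain ⟨m, hm, _⟩ := c2 a b hw
    simp at hm
  | some m1, some m2 =>
    obtain ⟨a1, b1, hw1, he1⟩ := w1 m1 rfl
    obtain ⟨a2, b2, hw2, he2⟩ := w2 m2 rfl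
    obtain ⟨m2', hm2', hle2⟩ := c2 a1 b1 hw1
    obtain ⟨m1', hm1', hle1⟩ := c1 a2 b2 hw2
    simp only [Option.some.injEq] at hm1'
    simp only [Option.some.injEq] at hm2'
    subst hm1' hm2'
    simp only [Option.some.injEq]
    omega

theorem onesC_nonneg (doll_seq : List String) (a b : Int) : 0 ≤ onesC doll_seq a b := by
  exact Int.natCast_nonneg _

theorem onesC_nil (doll_seq : List String) (a b : Int) (h : b ≤ a) : onesC doll_seq a b = 0 := by
  simp [onesC, PySem.List.pyRange_one_eq_nil h]

theorem onesC_succ (doll_seq : List String) (a b : Int) (h : a ≤ b) :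
    onesC doll_seq a (b + 1) = onesC doll_seq a b + (if PySem.List.pyGetD doll_seq b "" == "1" then 1 else 0) := by
  rw [onesC, PySem.List.pyRange_one_succ_right h, List.filter_append]
  by_cases hb : PySem.List.pyGetD doll_seq b "" == "1" <;>
    simp [onesC, hb]

theorem onesC_cons (doll_seq : List String) (a b : Int) (h : a < b) :
    onesC doll_seq a b = (if PySem.List.pyGetD doll_seq a "" == "1" then 1 else 0) + onesC doll_seq (a + 1) b := by
  rw [onesC, PySem.List.pyRange_one_cons h, List.filter_cons]
  by_cases ha : PySem.List.pyGetD doll_seq a "" == "1" <;>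
    simp [onesC, ha] <;> omega

theorem onesC_split (doll_seq : List String) (a m b : Int) (h1 : a ≤ m) (h2 : m ≤ b) :
    onesC doll_seq a b = onesC doll_seq a m + onesC doll_seq m b := by
  rw [onesC, PySem.List.pyRange_one_append a m b h1 h2, List.filter_append]
  simp [onesC]

theorem onesC_anti (doll_seq : List String) (a a' b : Int) (h0 : a ≤ a') (h1 : a' ≤ b) :
    onesC doll_seq a' b ≤ onesC doll_seq a b := by
  rw [onesC_split doll_seq a a' b h0 h1]
  have := onesC_nonneg doll_seq a a'
  omega

-- the loop invariant implies the loop's result is the minimum window length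
theorem loopA_res (doll_seq : List String) (n k : Int) (hk : 1 ≤ k) :
    ∀ (l r cnt : Int) (mn : Option Int),
    0 ≤ l → l ≤ r + 1 → r < n →
    cnt = onesC doll_seq l (r + 1) →
    (l = r + 1 → mn = some 1) →
    (∀ a b, Win doll_seq n k a b → (b < r ∨ a < l) → ∃ m, mn = some m ∧ m ≤ b - a + 1) →
    (∀ m, mn = some m → ∃ a b, Win doll_seq n k a b ∧ m = b - a + 1) →
    Res doll_seq n k (shortest_ryan_set.loopA doll_seq n k l r cnt mn) := by
  intro l r cnt mn
  induction l, r, cnt, mn using shortest_ryan_set.loopA.induct doll_seq n k with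
  | case1 l r cnt mn hrn hgt =>
    intro h0 hlr hr hc hone hcov hwit
    rw [shortest_ryan_set.loopA, dif_pos hrn, dif_pos hgt]
    have hmn : mn = some 1 := hone (by omega)
    subst hmn
    refine ⟨fun a b hw => ⟨1, rfl, ?_⟩, hwit⟩
    obtain ⟨ha, hab, hbn, hcnt⟩ := hw
    omega
  | case2 l cnt mn hck hrn hgt =>
    intro h0 hlr hr hc hone hcov hwit
    rw [shortest_ryan_set.loopA, dif_pos hrn, dif_neg hgt, dif_pos hck, dif_pos rfl]
    refine ⟨fun a b hw => ?_, hwit⟩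
    obtain ⟨ha, hab, hbn, hcnt⟩ := hw
    rcases lt_or_ge a l with hal | hal
    · exact hcov a b ⟨ha, hab, hbn, hcnt⟩ (Or.inr hal)
    rcases lt_or_ge b (n - 1) with hbr | hbr
    · exact hcov a b ⟨ha, hab, hbn, hcnt⟩ (Or.inl hbr)
    -- b = n - 1 = r and a ≥ l: the window count is bounded by cnt < k, contradiction
    have hb : b = n - 1 := by omega
    have hle : onesC doll_seq a (b + 1) ≤ onesC doll_seq l (b + 1) :=
      onesC_anti doll_seq l a (b + 1) hal (by omega)
    rw [show b + 1 = n - 1 + 1 by omega] at hle hcnt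
    omega
  | case3 l r cnt mn hrn hgt hck hne ih =>
    intro h0 hlr hr hc hone hcov hwit
    rw [shortest_ryan_set.loopA, dif_pos hrn, dif_neg hgt, dif_pos hck, dif_neg hne]
    simp only [dite_eq_ite] at ih
    apply ih h0 (by omega) (by omega)
    · rw [onesC_succ doll_seq l (r + 1) (by omega), hc]
    · intro h; omega
    · intro a b hw hreg
      obtain ⟨ha, hab, hbn, hcnt⟩ := hw
      rcases lt_or_ge a l with hal | hal
      · exact hcov a b ⟨ha, hab, hbn, hcnt⟩ (Or.inr hal)
      rcases lt_or_ge b r with hbr | hbr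
      · exact hcov a b ⟨ha, hab, hbn, hcnt⟩ (Or.inl hbr)
      -- b = r, a ≥ l: contradiction with cnt < k
      have hb : b = r := by omega
      have hle : onesC doll_seq a (b + 1) ≤ onesC doll_seq l (b + 1) :=
        onesC_anti doll_seq l a (b + 1) hal (by omega)
      rw [show b + 1 = r + 1 by omega] at hle hcnt
      omega
    · exact hwit
  | case4 l r cnt mn hrn hgt hck lenv mnv ih =>
    intro h0 hlr hr hc hone hcov hwit
    rw [shortest_ryan_set.loopA, dif_pos hrn, dif_neg hgt, dif_neg hck]
    simp only [dite_eq_ite] at ih ⊢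
    simp only [mnv, lenv] at ih
    have hlr' : l ≤ r := by omega
    -- the recorded window (l, r) is a Win
    have hwin : Win doll_seq n k l r := ⟨h0, hlr', hrn, by omega⟩
    -- facts about mn' = some v
    have hv : ∀ m, mn = some m → 1 ≤ m := by
      intro m hm
      obtain ⟨a, b, ⟨_, hab, _, _⟩, he⟩ := hwit m hm
      omega
    apply ih (by omega) (by omega) hr
    · rw [onesC_cons doll_seq l (r + 1) (by omega)] at hc
      omega
    · -- l + 1 = r + 1 → mn' = some 1
      intro hlr1
      have hl : l = r := by omega
      cases mn with
      | none =>
        simp only [Option.some.injEq]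
        omega
      | some m =>
        have h1 : 1 ≤ m := hv m rfl
        simp only [Option.some.injEq]
        omega
    · -- coverage for the enlarged region
      intro a b hw hreg
      obtain ⟨ha, hab, hbn, hcnt⟩ := hw
      rcases (by omega : (b < r ∨ a < l) ∨ (a = l)) with hold | hal
      · obtain ⟨m, hm, hle⟩ := hcov a b ⟨ha, hab, hbn, hcnt⟩ hold
        subst hm
        exact ⟨min m (r - l + 1), rfl, by omega⟩
      · -- a = l : any such window has length ≥ r - l + 1 or is already covered
        subst hal
        rcases lt_or_ge b r with hbr | hbr
        · obtain ⟨m, hm, hle⟩ := hcov a b ⟨ha, hab, hbn, hcnt⟩ (Or.inl hbr)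
          subst hm
          exact ⟨min m (r - a + 1), rfl, by omega⟩
        · cases mn with
          | none => exact ⟨r - a + 1, rfl, by omega⟩
          | some m => exact ⟨min m (r - a + 1), rfl, by omega⟩
    · -- every value mn' can hold is realized by a window
      intro m hm
      cases mn with
      | none =>
        simp only [Option.some.injEq] at hm
        exact ⟨l, r, hwin, by omega⟩
      | some m0 =>
        simp only [Option.some.injEq] at hm
        rcases le_total m0 (r - l + 1) with hle | hle
        · obtain ⟨a, b, hw, he⟩ := hwit m0 rfl
          exact ⟨a, b, hw, by omega⟩
        · exact ⟨l, r, hwin, by omega⟩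
  | case5 l r cnt mn hrn =>
    intro h0 hlr hr hc hone hcov hwit
    omega

theorem posList_mem (doll_seq : List String) (n p : Int) :
    p ∈ shortest_ryan_set_alt.posList doll_seq n ↔
      0 ≤ p ∧ p < n ∧ (PySem.List.pyGetD doll_seq p "" == "1") = true := by
  simp [shortest_ryan_set_alt.posList, List.mem_filter, PySem.List.mem_pyRange_one, and_assoc]

theorem posList_pairwise (doll_seq : List String) (n : Int) :
    (shortest_ryan_set_alt.posList doll_seq n).Pairwise (· < ·) :=
  List.Pairwise.filter _ (PySem.List.pairwise_lt_pyRange_one 0 n)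

theorem posList_mono (doll_seq : List String) (n : Int) (i j : Nat)
    (hij : i ≤ j) (hj : j < (shortest_ryan_set_alt.posList doll_seq n).length) :
    (shortest_ryan_set_alt.posList doll_seq n).getD i 0 ≤ (shortest_ryan_set_alt.posList doll_seq n).getD j 0 := by
  rw [List.getD_eq_getElem _ _ (by omega), List.getD_eq_getElem _ _ hj]
  rcases Nat.lt_or_ge i j with h | h
  · exact le_of_lt (List.pairwise_iff_getElem.mp (posList_pairwise doll_seq n) i j (by omega) hj h)
  · have : i = j := by omega
    subst this
    exact le_refl _

theorem onesC_zero (doll_seq : List String) (n : Int) :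
    onesC doll_seq 0 n = ((shortest_ryan_set_alt.posList doll_seq n).length : Int) := rfl

-- the lions of positions in [a, b) are exactly the interval slice of the position table
theorem posList_filter_interval (doll_seq : List String) (n a b : Int)
    (h0 : 0 ≤ a) (hab : a ≤ b) (hbn : b ≤ n) :
    (shortest_ryan_set_alt.posList doll_seq n).filter (fun p => decide (a ≤ p) && decide (p < b)) =
      (PySem.List.pyRange a b 1).filter (fun i => PySem.List.pyGetD doll_seq i "" == "1") := by
  unfold shortest_ryan_set_alt.posList
  have e1 : PySem.List.pyRange 0 n 1 =
      PySem.List.pyRange 0 a 1 ++ (PySem.List.pyRange a b 1 ++ PySem.List.pyRange b n 1) := by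
    rw [← PySem.List.pyRange_one_append a b n hab hbn]
    exact PySem.List.pyRange_one_append 0 a n h0 (by omega)
  rw [e1, List.filter_append, List.filter_append, List.filter_append, List.filter_append]
  have g1 : (List.filter (fun i => PySem.List.pyGetD doll_seq i "" == "1") (PySem.List.pyRange 0 a 1)).filter
      (fun p => decide (a ≤ p) && decide (p < b)) = [] := by
    refine List.filter_eq_nil_iff.mpr (fun x hx => ?_)
    have hm := (List.mem_filter.mp hx).1
    have := PySem.List.mem_pyRange_one.mp hm
    simp only [Bool.and_eq_true, decide_eq_true_eq, not_and]
    omega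
  have g2 : (List.filter (fun i => PySem.List.pyGetD doll_seq i "" == "1") (PySem.List.pyRange a b 1)).filter
      (fun p => decide (a ≤ p) && decide (p < b)) =
      List.filter (fun i => PySem.List.pyGetD doll_seq i "" == "1") (PySem.List.pyRange a b 1) := by
    refine List.filter_eq_self.mpr (fun x hx => ?_)
    have hm := (List.mem_filter.mp hx).1
    have := PySem.List.mem_pyRange_one.mp hm
    simp only [Bool.and_eq_true, decide_eq_true_eq]
    omega
  have g3 : (List.filter (fun i => PySem.List.pyGetD doll_seq i "" == "1") (PySem.List.pyRange b n 1)).filter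
      (fun p => decide (a ≤ p) && decide (p < b)) = [] := by
    refine List.filter_eq_nil_iff.mpr (fun x hx => ?_)
    have hm := (List.mem_filter.mp hx).1
    have := PySem.List.mem_pyRange_one.mp hm
    simp only [Bool.and_eq_true, decide_eq_true_eq, not_and]
    omega
  rw [g1, g2, g3]
  simp

-- k consecutive entries of the position table give a window with at least k lions
theorem win_of_index (doll_seq : List String) (n k : Int) (hk : 1 ≤ k) (i : Nat)
    (hik : i + k.toNat ≤ (shortest_ryan_set_alt.posList doll_seq n).length) :
    Win doll_seq n k ((shortest_ryan_set_alt.posList doll_seq n).getD i 0)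
      ((shortest_ryan_set_alt.posList doll_seq n).getD (i + k.toNat - 1) 0) := by
  set P := shortest_ryan_set_alt.posList doll_seq n with hP
  have hkN : 1 ≤ k.toNat := by omega
  have hi : i < P.length := by omega
  have hj : i + k.toNat - 1 < P.length := by omega
  have hmema : P.getD i 0 ∈ P := by rw [List.getD_eq_getElem _ _ hi]; exact List.getElem_mem hi
  have hmemb : P.getD (i + k.toNat - 1) 0 ∈ P := by
    rw [List.getD_eq_getElem _ _ hj]; exact List.getElem_mem hj
  obtain ⟨ha0, _, _⟩ := (posList_mem doll_seq n _).mp hmema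
  obtain ⟨_, hbn, _⟩ := (posList_mem doll_seq n _).mp hmemb
  have hab : P.getD i 0 ≤ P.getD (i + k.toNat - 1) 0 := posList_mono doll_seq n i _ (by omega) hj
  refine ⟨ha0, hab, hbn, ?_⟩
  -- count at least k in [a, b+1)
  have hbridge := posList_filter_interval doll_seq n (P.getD i 0) (P.getD (i + k.toNat - 1) 0 + 1)
    ha0 (by omega) (by omega)
  have hcount : onesC doll_seq (P.getD i 0) (P.getD (i + k.toNat - 1) 0 + 1) =
      ((P.filter (fun p => decide (P.getD i 0 ≤ p) && decide (p < P.getD (i + k.toNat - 1) 0 + 1))).length : Int) := by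
    rw [onesC, ← hbridge]
  rw [hcount]
  -- the k entries P[i..i+k-1] all pass the filter
  have hseg : k.toNat ≤ (P.filter (fun p => decide (P.getD i 0 ≤ p) && decide (p < P.getD (i + k.toNat - 1) 0 + 1))).length := by
    rw [← List.countP_eq_length_filter]
    have hsub : ((P.drop i).take k.toNat).Sublist P :=
      (List.take_sublist _ _).trans (List.drop_sublist _ _)
    have hlen : ((P.drop i).take k.toNat).length = k.toNat := by
      simp [List.length_take, List.length_drop]; omega
    have hall : List.countP (fun p => decide (P.getD i 0 ≤ p) && decide (p < P.getD (i + k.toNat - 1) 0 + 1))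
        ((P.drop i).take k.toNat) = ((P.drop i).take k.toNat).length := by
      refine List.countP_eq_length.mpr (fun x hx => ?_)
      obtain ⟨j, hjlt, hjx⟩ := List.mem_iff_getElem.mp hx
      have hjk : j < k.toNat := by omega
      have hx2 : x = P[i + j]'(by omega) := by
        rw [← hjx, List.getElem_take, List.getElem_drop]
      have h1 : P.getD i 0 ≤ x := by
        rw [hx2]
        have := posList_mono doll_seq n i (i + j) (by omega) (by simp only [← hP]; omega)
        rwa [List.getD_eq_getElem _ _ (by omega : i + j < P.length)] at this
      have h2 : x ≤ P.getD (i + k.toNat - 1) 0 := by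
        rw [hx2]
        have := posList_mono doll_seq n (i + j) (i + k.toNat - 1) (by omega) (by simp only [← hP]; omega)
        rwa [List.getD_eq_getElem _ _ (by omega : i + j < P.length)] at this
      simp only [Bool.and_eq_true, decide_eq_true_eq]
      omega
    have := hsub.countP_le (p := fun p => decide (P.getD i 0 ≤ p) && decide (p < P.getD (i + k.toNat - 1) 0 + 1))
    omega
  omega

-- every window with at least k lions dominates some group of k consecutive table entries
theorem index_of_win (doll_seq : List String) (n k a b : Int) (hk : 1 ≤ k)
    (hw : Win doll_seq n k a b) :
    ∃ i : Nat, i + k.toNat ≤ (shortest_ryan_set_alt.posList doll_seq n).length ∧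
      a ≤ (shortest_ryan_set_alt.posList doll_seq n).getD i 0 ∧
      (shortest_ryan_set_alt.posList doll_seq n).getD (i + k.toNat - 1) 0 ≤ b := by
  obtain ⟨ha0, hab, hbn, hcnt⟩ := hw
  set P := shortest_ryan_set_alt.posList doll_seq n with hP
  set F1 := List.filter (fun i => PySem.List.pyGetD doll_seq i "" == "1") (PySem.List.pyRange 0 a 1) with hF1
  set F2 := List.filter (fun i => PySem.List.pyGetD doll_seq i "" == "1") (PySem.List.pyRange a (b + 1) 1) with hF2
  set F3 := List.filter (fun i => PySem.List.pyGetD doll_seq i "" == "1") (PySem.List.pyRange (b + 1) n 1) with hF3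
  have hsplit : P = F1 ++ (F2 ++ F3) := by
    rw [hP]
    unfold shortest_ryan_set_alt.posList
    have e1 : PySem.List.pyRange 0 n 1 =
        PySem.List.pyRange 0 a 1 ++ (PySem.List.pyRange a (b + 1) 1 ++ PySem.List.pyRange (b + 1) n 1) := by
      rw [← PySem.List.pyRange_one_append a (b + 1) n (by omega) (by omega)]
      exact PySem.List.pyRange_one_append 0 a n ha0 (by omega)
    rw [e1, List.filter_append, List.filter_append]
  have hl2 : k ≤ (F2.length : Int) := hcnt
  have hkN : k.toNat ≤ F2.length := by omega
  have hlenP : P.length = F1.length + (F2.length + F3.length) := by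
    rw [hsplit]; simp
  refine ⟨F1.length, by omega, ?_, ?_⟩
  · -- a ≤ P[F1.length] = F2[0]
    have h0lt : 0 < F2.length := by omega
    have hgd : P.getD F1.length 0 = F2.getD 0 0 := by
      rw [hsplit, List.getD_append_right F1 (F2 ++ F3) 0 F1.length (le_refl _), Nat.sub_self,
        List.getD_append F2 F3 0 0 h0lt]
    rw [hgd]
    have hm : F2.getD 0 0 ∈ List.filter (fun i => PySem.List.pyGetD doll_seq i "" == "1")
        (PySem.List.pyRange a (b + 1) 1) := by
      rw [← hF2]
      rw [List.getD_eq_getElem _ _ h0lt]; exact List.getElem_mem h0lt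
    have := PySem.List.mem_pyRange_one.mp (List.mem_filter.mp hm).1
    omega
  · -- P[F1.length + k.toNat - 1] = F2[k.toNat - 1] ≤ b
    have hjlt : k.toNat - 1 < F2.length := by omega
    have hgd : P.getD (F1.length + k.toNat - 1) 0 = F2.getD (k.toNat - 1) 0 := by
      rw [hsplit, List.getD_append_right F1 (F2 ++ F3) 0 _ (by omega),
        show F1.length + k.toNat - 1 - F1.length = k.toNat - 1 by omega,
        List.getD_append F2 F3 0 _ hjlt]
    rw [hgd]
    have hm : F2.getD (k.toNat - 1) 0 ∈ List.filter (fun i => PySem.List.pyGetD doll_seq i "" == "1")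
        (PySem.List.pyRange a (b + 1) 1) := by
      rw [← hF2]
      rw [List.getD_eq_getElem _ _ hjlt]; exact List.getElem_mem hjlt
    have := PySem.List.mem_pyRange_one.mp (List.mem_filter.mp hm).1
    omega

-- B's branch for k ≥ 1: its value, as an Option, also satisfies Res
theorem alt_res (doll_seq : List String) (n k : Int) (hk : 1 ≤ k) :
    Res doll_seq n k
      (if ((shortest_ryan_set_alt.posList doll_seq n).length : Int) < k then none
       else some ((PySem.List.min?
        ((PySem.List.pyRange 0 (((shortest_ryan_set_alt.posList doll_seq n).length : Int) - k + 1) 1).map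
          (fun i => PySem.List.pyGetD (shortest_ryan_set_alt.posList doll_seq n) (i + k - 1) 0 -
                    PySem.List.pyGetD (shortest_ryan_set_alt.posList doll_seq n) i 0 + 1))
        (fun x => x)).getD 0)) := by
  by_cases hlt : ((shortest_ryan_set_alt.posList doll_seq n).length : Int) < k
  · rw [if_pos hlt]
    refine ⟨fun a b hw => absurd hw ?_, fun m hm => by simp at hm⟩
    rintro ⟨ha0, hab, hbn, hcnt⟩
    have h1 := onesC_split doll_seq 0 a n ha0 (by omega)
    have h2 := onesC_split doll_seq a (b + 1) n (by omega) (by omega)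
    have h3 := onesC_nonneg doll_seq 0 a
    have h4 := onesC_nonneg doll_seq (b + 1) n
    have h5 := onesC_zero doll_seq n
    omega
  · rw [if_neg hlt]
    set P := shortest_ryan_set_alt.posList doll_seq n with hP
    set f : Int → Int := fun i => PySem.List.pyGetD P (i + k - 1) 0 - PySem.List.pyGetD P i 0 + 1 with hf
    set cands := (PySem.List.pyRange 0 ((P.length : Int) - k + 1) 1).map f with hcands
    have hne : cands ≠ [] := by
      rw [hcands]
      have : (PySem.List.pyRange 0 ((P.length : Int) - k + 1) 1).length = (((P.length : Int) - k + 1) - 0).toNat :=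
        PySem.List.length_pyRange_one _ _
      intro hnil
      rw [List.map_eq_nil_iff] at hnil
      rw [hnil] at this
      simp at this
      omega
    obtain ⟨v, hv⟩ : ∃ v, PySem.List.min? cands (fun x => x) = some v := by
      cases hmin : PySem.List.min? cands (fun x => x) with
      | none => exact absurd ((PySem.List.min?_eq_none_iff _ _).mp hmin) hne
      | some v => exact ⟨v, rfl⟩
    rw [hv, Option.getD_some]
    constructor
    · -- every window is at least v long
      intro a b hw
      refine ⟨v, rfl, ?_⟩
      obtain ⟨i, hik, hai, hib⟩ := index_of_win doll_seq n k a b hk hw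
      rw [← hP] at hik hai hib
      have hmem : f (i : Int) ∈ cands := by
        rw [hcands]
        refine List.mem_map.mpr ⟨(i : Int), ?_, rfl⟩
        refine PySem.List.mem_pyRange_one.mpr ⟨by omega, by omega⟩
      have hvle : v ≤ f (i : Int) := PySem.List.min?_isMin hv _ hmem
      have e1 : PySem.List.pyGetD P ((i : Int)) 0 = P.getD i 0 := PySem.List.pyGetD_natCast ..
      have e2 : PySem.List.pyGetD P ((i : Int) + k - 1) 0 = P.getD (i + k.toNat - 1) 0 := by
        rw [show (i : Int) + k - 1 = ((i + k.toNat - 1 : Nat) : Int) by omega]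
        exact PySem.List.pyGetD_natCast ..
      rw [hf] at hvle
      simp only [e1, e2] at hvle
      omega
    · -- v is itself the length of a window
      intro m hm
      rw [Option.some.injEq] at hm
      subst hm
      have hvmem := PySem.List.min?_mem hv
      rw [hcands] at hvmem
      obtain ⟨iI, hiI, hfv⟩ := List.mem_map.mp hvmem
      obtain ⟨hiI0, hiIlt⟩ := PySem.List.mem_pyRange_one.mp hiI
      have hik : iI.toNat + k.toNat ≤ P.length := by omega
      have hwin := win_of_index doll_seq n k hk iI.toNat (by rw [← hP]; omega)
      rw [← hP] at hwin
      refine ⟨_, _, hwin, ?_⟩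
      have e1 : PySem.List.pyGetD P iI 0 = P.getD iI.toNat 0 := by
        rw [show iI = ((iI.toNat : Nat) : Int) by omega]
        exact PySem.List.pyGetD_natCast ..
      have e2 : PySem.List.pyGetD P (iI + k - 1) 0 = P.getD (iI.toNat + k.toNat - 1) 0 := by
        rw [show iI + k - 1 = ((iI.toNat + k.toNat - 1 : Nat) : Int) by omega]
        exact PySem.List.pyGetD_natCast ..
      rw [hf] at hfv
      simp only [e1, e2] at hfv
      omega

-- ===== VERDICT (by name: the statement is the Claim_ definition above) =====
theorem shortest_ryan_set_spec : Claim_equal_shortest_ryan_set := by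
  intro doll_seq n k _hdom _hpre
  unfold Spec_shortest_ryan_set
  by_cases hk0 : k ≤ 0
  · -- k ≤ 0: A's first iteration immediately records a window of length 1
    unfold shortest_ryan_set shortest_ryan_set_alt
    rw [if_pos hk0]
    by_cases hn : 1 ≤ n
    · rw [if_pos hn]
      have hc0 : 0 ≤ (if PySem.List.pyGetD doll_seq 0 "" == "1" then (1 : Int) else 0) := by
        split <;> omega
      rw [shortest_ryan_set.loopA, dif_pos (show (0 : Int) < n by omega),
        dif_neg (show ¬(0 : Int) > 0 by omega), dif_neg (show ¬_ < k by omega)]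
      rw [shortest_ryan_set.loopA, dif_pos (show (0 : Int) < n by omega),
        dif_pos (show (0 : Int) + 1 > 0 by omega)]
      norm_num
    · rw [if_neg hn]
      rw [shortest_ryan_set.loopA, dif_neg (show ¬(0 : Int) < n by omega)]
  · -- k ≥ 1
    have hk1 : 1 ≤ k := by omega
    by_cases hn : 1 ≤ n
    · have hA := loopA_res doll_seq n k hk1 0 0
        (if PySem.List.pyGetD doll_seq 0 "" == "1" then (1 : Int) else 0) none
        (le_refl 0) (by omega) (by omega)
        (by rw [onesC_succ doll_seq 0 0 (le_refl 0), onesC_nil doll_seq 0 0 (le_refl 0)]; omega)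
        (fun h => absurd h (by omega))
        (fun a b hw hreg => absurd hreg (by obtain ⟨ha, hab, _, _⟩ := hw; omega))
        (fun m hm => nomatch hm)
      have hB := alt_res doll_seq n k hk1
      have heq := Res_unique doll_seq n k _ _ hA hB
      unfold shortest_ryan_set shortest_ryan_set_alt
      rw [if_neg hk0]
      by_cases hlt : ((shortest_ryan_set_alt.posList doll_seq n).length : Int) < k
      · rw [if_pos hlt] at heq
        rw [if_pos hlt, heq]
      · rw [if_neg hlt] at heq
        rw [if_neg hlt, heq]
    · -- k ≥ 1, n ≤ 0: no iteration, no positions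
      unfold shortest_ryan_set shortest_ryan_set_alt
      rw [shortest_ryan_set.loopA, dif_neg (show ¬(0 : Int) < n by omega), if_neg hk0]
      have hemp : shortest_ryan_set_alt.posList doll_seq n = [] := by
        unfold shortest_ryan_set_alt.posList
        rw [PySem.List.pyRange_one_eq_nil (by omega)]
        rfl
      rw [hemp, if_pos (by simp; omega)]
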